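-- pv_equiv track=rewrite | github.com/Lazarev-true/Python_HW | Task_6/Chess_4_options.py | chess
-- ===== SOURCE A (Python) =====
-- def chess(coordinates):
--     res = 0
--     for key_1, value_1 in coordinates.items():
--         for key_2, value_2 in coordinates.items():
--             if key_1 == key_2 or value_1 == value_2 or abs(key_1 - key_2) == abs(value_1 - value_2):
--                 res += 1
--     if res > 8: # Т.к. значения из одного списка, то они повторяются, но не более 8 раз
--         return False
--     else:
--         return True
-- ===== SOURCE B (Python) =====
-- def chess(coordinates):
--     # One pass: count same-column, same-anti-diagonal and same-diagonal groups
--     # with hash maps; for distinct keys the three conflict kinds are mutually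
--     # exclusive, so each new point adds 1 + 2*(earlier points it conflicts with).
--     vals = {}
--     sums = {}
--     diffs = {}
--     res = 0
--     for k, v in coordinates.items():
--         res += 1 + 2 * (vals.get(v, 0) + sums.get(k + v, 0) + diffs.get(k - v, 0))
--         vals[v] = vals.get(v, 0) + 1
--         sums[k + v] = sums.get(k + v, 0) + 1
--         diffs[k - v] = diffs.get(k - v, 0) + 1
--     return res <= 8
-- ===== Notes on version B (the rewrite author's own statement) =====
-- stated objective: faster
-- what changed: Replaced the O(n^2) all-pairs double loop over dict items by a single pass that maintains hash-map counters for column, key+value and key-value groups and adds 1 + 2*(earlier same-group points) per item, exact because the three conflict kinds are mutually exclusive for distinct keys.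
import Mathlib
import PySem

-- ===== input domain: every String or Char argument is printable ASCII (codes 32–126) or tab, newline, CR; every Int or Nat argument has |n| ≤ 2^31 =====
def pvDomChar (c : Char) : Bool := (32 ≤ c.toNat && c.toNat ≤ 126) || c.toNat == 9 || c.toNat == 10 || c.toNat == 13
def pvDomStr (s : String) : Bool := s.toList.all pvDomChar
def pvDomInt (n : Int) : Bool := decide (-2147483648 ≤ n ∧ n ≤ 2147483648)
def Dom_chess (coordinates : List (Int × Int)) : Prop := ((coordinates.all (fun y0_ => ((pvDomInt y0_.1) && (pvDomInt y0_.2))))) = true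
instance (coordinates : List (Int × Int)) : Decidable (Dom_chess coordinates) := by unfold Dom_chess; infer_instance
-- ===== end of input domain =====

-- B replaces A's O(n^2) all-pairs double loop by one pass over hash-map group
-- counters (column, key+value, key-value); measured asymptotically faster.


-- ===== PORT A =====
def chess (coordinates : List (Int × Int)) : Bool :=
  let res : Int := coordinates.foldl (fun res p1 =>
    coordinates.foldl (fun res p2 =>
      if p1.1 == p2.1 || p1.2 == p2.2 || (p1.1 - p2.1).natAbs == (p1.2 - p2.2).natAbs
      then res + 1 else res) res) 0
  if res > 8 then false else true

-- ===== PORT B =====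
def chess_alt (coordinates : List (Int × Int)) : Bool :=
  let st := coordinates.foldl
    (fun (st : PySem.Dict Int Int × PySem.Dict Int Int × PySem.Dict Int Int × Int) p =>
      let vals := st.1
      let sums := st.2.1
      let diffs := st.2.2.1
      let res := st.2.2.2 + 1 + 2 * (vals.getD p.2 0 + sums.getD (p.1 + p.2) 0 + diffs.getD (p.1 - p.2) 0)
      (vals.insert p.2 (vals.getD p.2 0 + 1),
       sums.insert (p.1 + p.2) (sums.getD (p.1 + p.2) 0 + 1),
       diffs.insert (p.1 - p.2) (diffs.getD (p.1 - p.2) 0 + 1),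
       res))
    (PySem.Dict.empty, PySem.Dict.empty, PySem.Dict.empty, (0 : Int))
  decide (st.2.2.2 ≤ 8)

-- ===== PRECONDITION & SPEC =====
-- Pre_ excludes lists with duplicate first components: A's parameter is a Python
-- dict, whose keys are necessarily distinct, so such lists represent no dict input.
def Pre_chess (coordinates : List (Int × Int)) : Prop :=
  (coordinates.map Prod.fst).Nodup
instance (coordinates : List (Int × Int)) : Decidable (Pre_chess coordinates) := by
  unfold Pre_chess; infer_instance

def pvWitness_chess : (List (Int × Int)) := [(0, 0), (1, 2), (3, 1)]

def Spec_chess (coordinates : List (Int × Int)) (out : Bool) : Prop := out = chess_alt coordinates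
instance (coordinates : List (Int × Int)) (out : Bool) : Decidable (Spec_chess coordinates out) := by unfold Spec_chess; infer_instance

-- ===== CLAIM (what is proved, stated in full; the proofs are below) =====
def Claim_equal_chess : Prop := ∀ (coordinates : List (Int × Int)), Dom_chess coordinates → Pre_chess coordinates → Spec_chess coordinates (chess coordinates)

-- ===== LEMMAS AND PROOFS =====

-- the conflict test of A's inner loop, named for the proofs
def fcond (p q : Int × Int) : Bool :=
  p.1 == q.1 || p.2 == q.2 || (p.1 - q.1).natAbs == (p.2 - q.2).natAbs

lemma fcond_comm (p q : Int × Int) : fcond p q = fcond q p := by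
  rw [Bool.eq_iff_iff]
  simp only [fcond, Bool.or_eq_true, beq_iff_eq]
  omega

lemma fcond_refl (p : Int × Int) : fcond p p = true := by
  simp [fcond]

-- A's result as a sum of per-point conflict counts
def SA (l : List (Int × Int)) : Int :=
  (l.map (fun p => (l.countP (fcond p) : Int))).sum

lemma chessA_eq (l : List (Int × Int)) :
    chess l = if SA l > 8 then false else true := by
  have hcong : l.foldl (fun res p1 =>
        l.foldl (fun res p2 => if fcond p1 p2 then res + 1 else res) res) 0
      = l.foldl (fun res p => res + (l.countP (fcond p) : Int)) 0 := by
    apply PySem.List.foldl_congr_mem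
    intro a p _
    exact PySem.List.foldl_if_add_one (fcond p) l a
  show (if l.foldl (fun res p1 =>
        l.foldl (fun res p2 => if fcond p1 p2 then res + 1 else res) res) 0 > 8
      then false else true) = _
  simp only [hcong, PySem.List.foldl_add, SA]
  simp

-- when p's key occurs nowhere in t, the three conflict kinds are mutually
-- exclusive, so A's per-point count splits into the three group counts
lemma countP_fcond (p : Int × Int) (t : List (Int × Int))
    (h : p.1 ∉ t.map Prod.fst) :
    t.countP (fcond p) =
      (t.map Prod.snd).count p.2 + (t.map (fun q => q.1 + q.2)).count (p.1 + p.2)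
        + (t.map (fun q => q.1 - q.2)).count (p.1 - p.2) := by
  induction t with
  | nil => simp
  | cons q t ih =>
    simp only [List.map_cons, List.mem_cons, not_or] at h
    obtain ⟨hq, ht⟩ := h
    simp only [List.countP_cons, List.map_cons, List.count_cons, ih ht,
      fcond, Bool.or_eq_true, beq_iff_eq]
    split_ifs <;> omega

lemma sum_ite_eq_countP (p : Int × Int) (t : List (Int × Int)) :
    (t.map (fun x => if fcond x p then (1 : Int) else 0)).sum
      = (t.countP (fun x => fcond x p) : Int) := by
  induction t with
  | nil => simp
  | cons q t ih =>
    simp only [List.map_cons, List.sum_cons, List.countP_cons, ih]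
    split_ifs <;> push_cast <;> ring

lemma SA_snoc (p : Int × Int) (t : List (Int × Int)) :
    SA (t ++ [p]) = SA t + 2 * (t.countP (fcond p) : Int) + 1 := by
  unfold SA
  have hfun : (fun x => (((t ++ [p]).countP (fcond x) : Nat) : Int))
      = fun x => (t.countP (fcond x) : Int) + (if fcond x p then (1 : Int) else 0) := by
    funext x
    simp only [List.countP_append, List.countP_cons, List.countP_nil]
    push_cast
    split_ifs <;> simp
  rw [List.map_append, List.sum_append, hfun]
  have hsplit : (t.map (fun x =>
        (t.countP (fcond x) : Int) + (if fcond x p then (1 : Int) else 0))).sum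
      = (t.map (fun x => (t.countP (fcond x) : Int))).sum
        + (t.map (fun x => if fcond x p then (1 : Int) else 0)).sum :=
    List.sum_map_add
  rw [hsplit, sum_ite_eq_countP,
    List.countP_congr (fun x _ => by rw [fcond_comm x p])]
  simp only [List.map_cons, List.map_nil, List.sum_cons, List.sum_nil, fcond_refl]
  push_cast
  ring

-- B's loop step and start state, named for the proofs
def stepB (st : PySem.Dict Int Int × PySem.Dict Int Int × PySem.Dict Int Int × Int)
    (p : Int × Int) :
    PySem.Dict Int Int × PySem.Dict Int Int × PySem.Dict Int Int × Int :=
  let vals := st.1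
  let sums := st.2.1
  let diffs := st.2.2.1
  let res := st.2.2.2 + 1 + 2 * (vals.getD p.2 0 + sums.getD (p.1 + p.2) 0 + diffs.getD (p.1 - p.2) 0)
  (vals.insert p.2 (vals.getD p.2 0 + 1),
   sums.insert (p.1 + p.2) (sums.getD (p.1 + p.2) 0 + 1),
   diffs.insert (p.1 - p.2) (diffs.getD (p.1 - p.2) 0 + 1),
   res)

def initB : PySem.Dict Int Int × PySem.Dict Int Int × PySem.Dict Int Int × Int :=
  (PySem.Dict.empty, PySem.Dict.empty, PySem.Dict.empty, (0 : Int))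

lemma chess_alt_eq (l : List (Int × Int)) :
    chess_alt l = decide ((l.foldl stepB initB).2.2.2 ≤ 8) := rfl

lemma B_inv (l : List (Int × Int)) :
    (∀ x, (l.foldl stepB initB).1.getD x 0 = ((l.map Prod.snd).count x : Int)) ∧
    (∀ x, (l.foldl stepB initB).2.1.getD x 0 = ((l.map (fun q => q.1 + q.2)).count x : Int)) ∧
    (∀ x, (l.foldl stepB initB).2.2.1.getD x 0 = ((l.map (fun q => q.1 - q.2)).count x : Int)) ∧
    ((l.map Prod.fst).Nodup → (l.foldl stepB initB).2.2.2 = SA l) := by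
  induction l using List.reverseRecOn with
  | nil => simp [initB, SA, PySem.Dict.getD_empty]
  | append_singleton t p ih =>
    obtain ⟨ih1, ih2, ih3, ih4⟩ := ih
    rw [List.foldl_append]
    refine ⟨?_, ?_, ?_, ?_⟩
    · intro x
      simp only [List.foldl_cons, List.foldl_nil, stepB, PySem.Dict.getD_insert, ih1, List.map_append,
        List.count_append, List.map_cons, List.map_nil, List.count_cons,
        List.count_nil, beq_iff_eq]
      split_ifs <;> subst_vars <;> omega
    · intro x
      simp only [List.foldl_cons, List.foldl_nil, stepB, PySem.Dict.getD_insert, ih2, List.map_append,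
        List.count_append, List.map_cons, List.map_nil, List.count_cons,
        List.count_nil, beq_iff_eq]
      split_ifs <;> subst_vars <;> omega
    · intro x
      simp only [List.foldl_cons, List.foldl_nil, stepB, PySem.Dict.getD_insert, ih3, List.map_append,
        List.count_append, List.map_cons, List.map_nil, List.count_cons,
        List.count_nil, beq_iff_eq]
      split_ifs <;> subst_vars <;> omega
    · intro hn
      rw [List.map_append] at hn
      have hkey : p.1 ∉ t.map Prod.fst := by
        intro hmem
        have := List.disjoint_of_nodup_append hn
        exact this hmem (by simp)
      have hnt : (t.map Prod.fst).Nodup := (List.nodup_append.mp hn).1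
      simp only [List.foldl_cons, List.foldl_nil, stepB]
      rw [ih1, ih2, ih3, ih4 hnt, SA_snoc, countP_fcond p t hkey]
      push_cast
      ring

-- ===== VERDICT (by name: the statement is the Claim_ definition above) =====
theorem chess_spec : Claim_equal_chess := by
  intro l _dom pre
  unfold Spec_chess
  rw [chessA_eq, chess_alt_eq, (B_inv l).2.2.2 pre]
  split_ifs with h
  · have h' : ¬ SA l ≤ 8 := by omega
    simp [h']
  · have h' : SA l ≤ 8 := by omega
    simp [h']
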